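-- pv_equiv track=rewrite | github.com/jramaswami/Binary_Search_Python | rocketship_rescue.py | solve
-- ===== SOURCE A (Python) =====
-- def solve(weights, limit):
--     weights0 = sorted(weights)
--     soln = 0
--     while weights0:
--         # Remove any already used weights (over limit).
--         while weights0 and weights0[-1] > limit:
--             weights0.pop()
--
--         if weights0:
--             soln += 1
--             # Take the largest weight
--             rocketship = limit - weights0.pop()
--             # Take the next largest weight that fits.
--             for i in range(len(weights0) - 1, -1, -1):
--                 if weights0[i] <= rocketship:
--                     weights0[i] = limit + 1
--                     break
--     return soln
-- ===== SOURCE B (Python) =====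
-- def solve(weights, limit):
--     fleet = sorted(w for w in weights if w <= limit)
--     rockets = 0
--     lo, hi = 0, len(fleet) - 1
--     while lo <= hi:
--         if fleet[lo] + fleet[hi] <= limit:
--             lo += 1
--         hi -= 1
--         rockets += 1
--     return rockets
-- ===== Notes on version B (the rewrite author's own statement) =====
-- stated objective: faster
-- what changed: Replaces A's repeated pop-the-heaviest plus backward scan for the best-fitting partner (with in-place limit+1 marking) by a single sort of the feasible weights followed by a two-pointer sweep pairing the heaviest with the lightest remaining weight.
import Mathlib
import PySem

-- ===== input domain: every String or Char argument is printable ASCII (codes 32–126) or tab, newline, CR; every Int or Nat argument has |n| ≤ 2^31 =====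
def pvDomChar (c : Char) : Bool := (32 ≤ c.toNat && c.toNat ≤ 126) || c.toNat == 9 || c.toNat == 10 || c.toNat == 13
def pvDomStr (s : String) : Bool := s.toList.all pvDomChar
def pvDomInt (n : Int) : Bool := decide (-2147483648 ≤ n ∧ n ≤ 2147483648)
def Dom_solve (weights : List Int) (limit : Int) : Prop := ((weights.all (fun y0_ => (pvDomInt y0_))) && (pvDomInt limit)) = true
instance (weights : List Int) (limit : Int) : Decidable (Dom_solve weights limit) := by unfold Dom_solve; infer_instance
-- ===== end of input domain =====

-- B replaces A's O(n^2) pop-heaviest + backward best-fit scan by sort + two-pointer sweep (O(n log n)); return values proved equal (A does not mutate its caller-visible arguments).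

-- ===== PORT A =====
-- (pv_dropLast_lt, markLoop_length, dropTail_length_le are cited by the ports' termination proofs)
theorem pv_dropLast_lt {l : List Int} (h : l ≠ []) : l.dropLast.length < l.length := by
  cases l with
  | nil => simp at h
  | cons a t => simp [List.length_dropLast]

-- inner `while weights0 and weights0[-1] > limit: weights0.pop()`
def dropTail (limit : Int) (ws : List Int) : List Int :=
  if h : ws = [] then ws
  else if ws.getLast h > limit then dropTail limit ws.dropLast else ws
termination_by ws.length
decreasing_by exact pv_dropLast_lt h

-- `for i in range(len(weights0) - 1, -1, -1): if weights0[i] <= rocketship: weights0[i] = limit + 1; break`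
-- (fuel i+1 means the loop is about to inspect index i)
def markLoop (limit r : Int) (ws : List Int) : Nat → List Int
  | 0 => ws
  | (i+1) => if PySem.List.pyGetD ws (i : Int) 0 ≤ r then ws.set i (limit + 1)
             else markLoop limit r ws i

theorem markLoop_length (limit r : Int) (ws : List Int) (i : Nat) :
    (markLoop limit r ws i).length = ws.length := by
  induction i with
  | zero => rfl
  | succ i ih => simp only [markLoop]; split <;> simp [ih]

theorem dropTail_length_le (limit : Int) (ws : List Int) :
    (dropTail limit ws).length ≤ ws.length := by
  induction ws using dropTail.induct limit with
  | case1 => rw [dropTail]; simp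
  | case2 =>
      rename_i ws h hgt ih
      rw [dropTail]; simp only [h, hgt, if_pos, dif_neg, not_false_iff]
      exact ih.trans (Nat.le_of_lt (pv_dropLast_lt h))
  | case3 => rename_i ws h hgt; rw [dropTail]; simp [h, hgt]

-- the outer `while weights0:` loop
def solveLoop (limit : Int) (ws : List Int) (soln : Int) : Int :=
  if ws = [] then soln
  else
    let ws1 := dropTail limit ws
    if h1 : ws1 = [] then soln
    else
      solveLoop limit
        (markLoop limit (limit - ws1.getLast h1) ws1.dropLast ws1.dropLast.length)
        (soln + 1)
termination_by ws.length
decreasing_by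
  calc (markLoop limit (limit - (dropTail limit ws).getLast h1) (dropTail limit ws).dropLast (dropTail limit ws).dropLast.length).length
      = (dropTail limit ws).dropLast.length := markLoop_length _ _ _ _
    _ < (dropTail limit ws).length := pv_dropLast_lt h1
    _ ≤ ws.length := dropTail_length_le limit ws

def solve (weights : List Int) (limit : Int) : Int :=
  solveLoop limit (PySem.List.sorted weights (fun x => x) false) 0

-- ===== PORT B =====
-- `while lo <= hi: if fleet[lo] + fleet[hi] <= limit: lo += 1;  hi -= 1; rockets += 1`
def tpLoop (limit : Int) (fleet : List Int) (lo hi rockets : Int) : Int :=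
  if lo ≤ hi then
    tpLoop limit fleet
      (if PySem.List.pyGetD fleet lo 0 + PySem.List.pyGetD fleet hi 0 ≤ limit then lo + 1 else lo)
      (hi - 1) (rockets + 1)
  else rockets
termination_by (hi + 1 - lo).toNat
decreasing_by split <;> omega

def solve_alt (weights : List Int) (limit : Int) : Int :=
  let fleet := PySem.List.sorted (weights.filter (fun w => decide (w ≤ limit))) (fun x => x) false
  tpLoop limit fleet 0 ((fleet.length : Int) - 1) 0

-- ===== PRECONDITION & SPEC =====
def Spec_solve (weights : List Int) (limit : Int) (out : Int) : Prop := out = solve_alt weights limit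
instance (weights : List Int) (limit : Int) (out : Int) : Decidable (Spec_solve weights limit out) := by unfold Spec_solve; infer_instance

-- ===== CLAIM (what is proved, stated in full; the proofs are below) =====
def Claim_equal_solve : Prop := ∀ (weights : List Int) (limit : Int), Dom_solve weights limit → Spec_solve weights limit (solve weights limit)

-- ===== LEMMAS AND PROOFS =====

-- Abstract model of B: two-pointer on a sorted list = pair first with last if they fit, else last alone.
def twoP (limit : Int) (l : List Int) : Int :=
  match l with
  | [] => 0
  | x :: rest =>
    if h : rest = [] then 1
    else if x + rest.getLast h ≤ limit then 1 + twoP limit rest.dropLast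
    else 1 + twoP limit (x :: rest.dropLast)
termination_by l.length
decreasing_by
  all_goals
    have hl : rest.length ≠ 0 := fun hh => h (List.eq_nil_of_length_eq_zero hh)
    simp only [List.length_dropLast, List.length_cons]
    omega

-- Abstract model of one marking step of A on the sorted residual list:
-- drop the last element of the (≤ r)-prefix, i.e. the largest element ≤ r, if any.
def step (r : Int) (l : List Int) : List Int :=
  if (l.takeWhile (fun x => decide (x ≤ r))) = [] then l
  else (l.takeWhile (fun x => decide (x ≤ r))).dropLast ++ l.drop (l.takeWhile (fun x => decide (x ≤ r))).length

theorem step_length_le (r : Int) (l : List Int) : (step r l).length ≤ l.length := by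
  unfold step
  split
  · exact le_refl _
  · rename_i h
    have h1 : (l.takeWhile (fun x => decide (x ≤ r))).length ≤ l.length := (List.takeWhile_sublist _).length_le
    simp [List.length_dropLast, List.length_drop]
    omega

-- Abstract model of A: take the largest, remove the largest fitting partner.
def greedy (limit : Int) (l : List Int) : Int :=
  if h : l = [] then 0
  else 1 + greedy limit (step (limit - l.getLast h) l.dropLast)
termination_by l.length
decreasing_by
  calc (step (limit - l.getLast h) l.dropLast).length ≤ l.dropLast.length := step_length_le _ _
    _ < l.length := pv_dropLast_lt h

-- real entries after a phantom (= limit+1 marker) are strictly positive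
def Phant3 (limit : Int) (ws : List Int) : Prop :=
  ∀ u v, ws = u ++ v → (limit + 1) ∈ u → ∀ z ∈ v, z ≤ limit → 0 < z

def Fv (limit : Int) (ws : List Int) : List Int := ws.filter (fun x => decide (x ≤ limit))

def INV (limit : Int) (ws : List Int) : Prop :=
  (∀ x ∈ ws, x ≤ limit ∨ x = limit + 1) ∧ (Fv limit ws).Pairwise (· ≤ ·) ∧ Phant3 limit ws

theorem markLoop_append (limit r a : Int) (u : List Int) :
    ∀ i, i ≤ u.length → markLoop limit r (u ++ [a]) i = markLoop limit r u i ++ [a] := by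
  intro i
  induction i with
  | zero => intro _; rfl
  | succ i ih =>
      intro hle
      have hi : i < u.length := by omega
      have hget : PySem.List.pyGetD (u ++ [a]) (i : Int) 0 = PySem.List.pyGetD u (i : Int) 0 := by
        simp only [PySem.List.pyGetD_natCast]
        exact List.getD_append _ _ _ _ hi
      simp only [markLoop, hget]
      split
      · rw [List.set_append, if_pos hi]
      · exact ih (Nat.le_of_lt hi)

theorem markLoop_spec (limit r : Int) (ws : List Int) :
    (markLoop limit r ws ws.length = ws ∧ ∀ x ∈ ws, ¬ x ≤ r) ∨
    (∃ u y v, ws = u ++ y :: v ∧ y ≤ r ∧ (∀ z ∈ v, ¬ z ≤ r) ∧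
      markLoop limit r ws ws.length = u ++ (limit + 1) :: v) := by
  induction ws using List.reverseRecOn with
  | nil => left; exact ⟨rfl, by simp⟩
  | append_singleton u a ih =>
      have hlen : (u ++ [a]).length = u.length + 1 := by simp
      have hget : PySem.List.pyGetD (u ++ [a]) ((u.length : Nat) : Int) 0 = a := by
        simp only [PySem.List.pyGetD_natCast]
        have : u.length < (u ++ [a]).length := by simp
        rw [List.getD_eq_getElem _ _ this, List.getElem_concat_length rfl]
      rw [hlen]
      simp only [markLoop, hget]
      by_cases ha : a ≤ r
      · rw [if_pos ha]
        right
        refine ⟨u, a, [], by simp, ha, by simp, ?_⟩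
        rw [List.set_append, if_neg (by omega)]
        simp
      · rw [if_neg ha, markLoop_append limit r a u u.length (le_refl _)]
        rcases ih with ⟨hm, hall⟩ | ⟨u', y, v, hws, hy, hv, hm⟩
        · left
          constructor
          · rw [hm]
          · intro x hx
            rcases List.mem_append.mp hx with hx | hx
            · exact hall x hx
            · simp at hx; subst hx; exact ha
        · right
          refine ⟨u', y, v ++ [a], by rw [hws]; simp, hy, ?_, ?_⟩
          · intro z hz
            rcases List.mem_append.mp hz with hz | hz
            · exact hv z hz
            · simp at hz; subst hz; exact ha
          · rw [hm]; simp

theorem dropTail_filter (limit : Int) (ws : List Int) :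
    Fv limit (dropTail limit ws) = Fv limit ws := by
  induction ws using dropTail.induct limit with
  | case1 => rw [dropTail]; simp
  | case2 =>
      rename_i ws h hgt ih
      rw [dropTail]
      simp only [dif_neg h, if_pos hgt]
      rw [ih]
      conv_rhs => rw [← List.dropLast_append_getLast h]
      unfold Fv
      rw [List.filter_append]
      have : decide (ws.getLast h ≤ limit) = false := by simp; omega
      simp [this]
  | case3 =>
      rename_i ws h hgt
      rw [dropTail]
      simp [h, hgt]

theorem dropTail_last_le (limit : Int) (ws : List Int) :
    ∀ m : Int, (dropTail limit ws).getLast? = some m → m ≤ limit := by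
  induction ws using dropTail.induct limit with
  | case1 => intro m hm; rw [dropTail] at hm; simp at hm
  | case2 =>
      rename_i ws h hgt ih
      rw [dropTail]
      simp only [dif_neg h, if_pos hgt]
      exact ih
  | case3 =>
      rename_i ws h hgt
      rw [dropTail]
      simp only [dif_neg h, if_neg hgt]
      intro m hm
      rw [List.getLast?_eq_some_getLast h] at hm
      rw [Option.some_inj] at hm
      omega

theorem dropTail_eq_nil (limit : Int) (ws : List Int) :
    Fv limit ws = [] → dropTail limit ws = [] := by
  induction ws using dropTail.induct limit with
  | case1 => intro _; rw [dropTail]; simp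
  | case2 =>
      rename_i ws h hgt ih
      intro hF
      rw [dropTail]
      simp only [dif_neg h, if_pos hgt]
      apply ih
      unfold Fv at hF ⊢
      rw [List.filter_eq_nil_iff] at hF ⊢
      exact fun a ha => hF a ((List.dropLast_prefix ws).subset ha)
  | case3 =>
      rename_i ws h hgt
      intro hF
      exfalso
      unfold Fv at hF
      rw [List.filter_eq_nil_iff] at hF
      exact hF (ws.getLast h) (List.getLast_mem h) (by simp; omega)

theorem dropTail_prefix (limit : Int) (ws : List Int) : dropTail limit ws <+: ws := by
  induction ws using dropTail.induct limit with
  | case1 => rw [dropTail]; simp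
  | case2 =>
      rename_i ws h hgt ih
      rw [dropTail]
      simp only [dif_neg h, if_pos hgt]
      exact ih.trans (List.dropLast_prefix ws)
  | case3 =>
      rename_i ws h hgt
      rw [dropTail]
      simp [h, hgt]

theorem dropTail_idem (limit : Int) (ws : List Int) :
    dropTail limit (dropTail limit ws) = dropTail limit ws := by
  by_cases hnil : dropTail limit ws = []
  · rw [hnil, dropTail]; simp
  · rw [dropTail]
    rw [dif_neg hnil]
    have hle : (dropTail limit ws).getLast hnil ≤ limit :=
      dropTail_last_le limit ws _ (List.getLast?_eq_some_getLast hnil)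
    rw [if_neg (by omega)]

theorem Phant3_prefix {limit : Int} {ws ws' : List Int} (hp : ws' <+: ws)
    (h : Phant3 limit ws) : Phant3 limit ws' := by
  obtain ⟨t, rfl⟩ := hp
  intro u v heq hm z hz hzle
  exact h u (v ++ t) (by rw [heq, List.append_assoc]) hm z (List.mem_append_left _ hz) hzle

theorem INV_prefix {limit : Int} {ws ws' : List Int} (hp : ws' <+: ws)
    (h : INV limit ws) : INV limit ws' := by
  obtain ⟨h1, h2, h3⟩ := h
  refine ⟨fun x hx => h1 x (hp.subset hx), ?_, Phant3_prefix hp h3⟩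
  exact h2.sublist (List.IsPrefix.filter _ hp).sublist

theorem last_filter (limit : Int) (ws : List Int) {m : Int} (h : ws.getLast? = some m)
    (hle : m ≤ limit) : (Fv limit ws).getLast? = some m := by
  have hne : ws ≠ [] := by intro hh; rw [hh] at h; simp at h
  have hm : ws.getLast hne = m := by
    rw [List.getLast?_eq_some_getLast hne, Option.some_inj] at h; exact h
  conv_lhs => rw [← List.dropLast_append_getLast hne]
  unfold Fv
  rw [List.filter_append, hm]
  have : decide (m ≤ limit) = true := by simp [hle]
  simp [this]

-- one unfolding of solveLoop absorbs an initial dropTail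
theorem solveLoop_dropTail (limit : Int) (ws : List Int) (soln : Int) :
    solveLoop limit ws soln = solveLoop limit (dropTail limit ws) soln := by
  by_cases hws : ws = []
  · subst hws
    have h : dropTail limit ([] : List Int) = [] := by rw [dropTail]; simp
    rw [h]
  · by_cases h1 : dropTail limit ws = []
    · conv_lhs => rw [solveLoop]
      rw [if_neg hws]
      simp only [h1]
      have h2 : solveLoop limit [] soln = soln := by rw [solveLoop]; simp
      rw [h2]
      simp
    · conv_lhs => rw [solveLoop]
      rw [if_neg hws]
      conv_rhs => rw [solveLoop]
      rw [if_neg h1]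
      simp only [dropTail_idem]

theorem takeWhile_nil_of_fail {r : Int} {l : List Int}
    (h : ∀ x ∈ l, ¬ x ≤ r) : l.takeWhile (fun x => decide (x ≤ r)) = [] := by
  rw [List.takeWhile_eq_nil_iff]
  intro hl
  simp only [decide_eq_true_eq]
  exact h _ (List.get_mem l ⟨0, hl⟩)

theorem step_id_of_fail {r : Int} {l : List Int}
    (h : ∀ x ∈ l, ¬ x ≤ r) : step r l = l := by
  unfold step
  rw [takeWhile_nil_of_fail h]
  simp

theorem step_remove {r : Int} {A B : List Int} {y : Int}
    (hA : ∀ x ∈ A, x ≤ r) (hy : y ≤ r) (hB : ∀ z ∈ B, ¬ z ≤ r) :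
    step r (A ++ y :: B) = A ++ B := by
  have htwA : A.takeWhile (fun x => decide (x ≤ r)) = A :=
    List.takeWhile_eq_self_iff.mpr (fun x hx => by simpa using hA x hx)
  have htwB : B.takeWhile (fun x => decide (x ≤ r)) = [] := takeWhile_nil_of_fail hB
  have hp : (A ++ y :: B).takeWhile (fun x => decide (x ≤ r)) = A ++ [y] := by
    rw [List.takeWhile_append, htwA, if_pos rfl, List.takeWhile_cons, if_pos (by simpa using hy), htwB]
  unfold step
  rw [hp, if_neg (by simp), List.dropLast_concat]
  have hlen : (A ++ [y]).length = A.length + 1 := by simp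
  have hassoc : A ++ y :: B = (A ++ [y]) ++ B := by simp
  rw [hlen, hassoc]
  have := List.drop_left (l₁ := A ++ [y]) (l₂ := B)
  rw [hlen] at this
  rw [this]

-- the simulation: under INV, A's loop counts exactly greedy of the surviving (≤ limit) entries
theorem solveLoop_eq (limit : Int) :
    ∀ n ws soln, ws.length ≤ n → INV limit ws →
      solveLoop limit ws soln = soln + greedy limit (Fv limit ws) := by
  intro n
  induction n with
  | zero =>
      intro ws soln hlen _
      have : ws = [] := by
        cases ws with
        | nil => rfl
        | cons a t => simp at hlen
      subst this
      rw [solveLoop]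
      simp only [if_pos]
      have : Fv limit ([] : List Int) = [] := rfl
      rw [this, greedy]
      simp
  | succ n ih =>
      intro ws soln hlen hInv
      by_cases hFnil : Fv limit ws = []
      · have hdt : dropTail limit ws = [] := dropTail_eq_nil limit ws hFnil
        have hg : greedy limit (Fv limit ws) = 0 := by rw [hFnil, greedy]; simp
        rw [hg]
        by_cases hws : ws = []
        · rw [solveLoop, if_pos hws]; omega
        · rw [solveLoop, if_neg hws]
          simp only [hdt]
          simp
      · -- active iteration
        have hws : ws ≠ [] := by
          intro hh; apply hFnil; rw [hh]; rfl
        have h1 : dropTail limit ws ≠ [] := by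
          intro hh
          apply hFnil
          rw [← dropTail_filter limit ws, hh]
          rfl
        set ws1 := dropTail limit ws with hws1
        set m := ws1.getLast h1 with hm
        have hlast? : ws1.getLast? = some m := List.getLast?_eq_some_getLast h1
        have hm_le : m ≤ limit := dropTail_last_le limit ws m hlast?
        set ws2 := ws1.dropLast with hws2
        have hsnoc : ws2 ++ [m] = ws1 := List.dropLast_append_getLast h1
        have hINV1 : INV limit ws1 := INV_prefix (dropTail_prefix limit ws) hInv
        have hINV2 : INV limit ws2 := INV_prefix (List.dropLast_prefix ws1) hINV1
        have hFl1 : Fv limit ws1 = Fv limit ws := dropTail_filter limit ws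
        have hFlast? : (Fv limit ws).getLast? = some m := by
          rw [← hFl1]; exact last_filter limit ws1 hlast? hm_le
        have hFne : Fv limit ws ≠ [] := hFnil
        have hFlast : (Fv limit ws).getLast hFne = m := by
          rw [List.getLast?_eq_some_getLast hFne, Option.some_inj] at hFlast?
          exact hFlast?
        have hFv2 : Fv limit ws2 = (Fv limit ws).dropLast := by
          have : Fv limit ws1 = Fv limit ws2 ++ [m] := by
            rw [← hsnoc]
            unfold Fv
            rw [List.filter_append]
            simp [hm_le]
          rw [← hFl1, this, List.dropLast_concat]
        have hlen2 : ws2.length < ws.length := by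
          calc ws2.length < ws1.length := pv_dropLast_lt h1
            _ ≤ ws.length := dropTail_length_le limit ws
        set r := limit - m with hr
        have Hq : ∀ x ∈ ws2, x = limit + 1 → ¬ x ≤ r := by
          intro x hx hxeq hxle
          obtain ⟨α, β, hsplit⟩ := List.append_of_mem hx
          have hws1split : ws1 = (α ++ [x]) ++ (β ++ [m]) := by
            rw [← hsnoc, hsplit]; simp
          have hpos : 0 < m := by
            refine hINV1.2.2 (α ++ [x]) (β ++ [m]) hws1split ?_ m ?_ hm_le
            · rw [hxeq]; simp
            · simp
          omega
        have hgreedy : greedy limit (Fv limit ws) =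
            1 + greedy limit (step r (Fv limit ws2)) := by
          rw [greedy]
          rw [dif_neg hFne]
          rw [hFlast, hFv2]
        -- unfold one iteration of solveLoop
        rw [solveLoop, if_neg hws]
        simp only [← hws1]
        rw [dif_neg h1]
        rw [← hm, ← hws2, ← hr]
        rcases markLoop_spec limit r ws2 with ⟨hm3, hall⟩ | ⟨u, y, v, hsplit, hy, hv, hm3⟩
        · -- nothing fits: state unchanged
          rw [hm3]
          have hstep : step r (Fv limit ws2) = Fv limit ws2 := by
            apply step_id_of_fail
            intro x hx
            exact hall x (List.mem_of_mem_filter hx)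
          rw [ih ws2 (soln + 1) (by omega) hINV2, hgreedy, hstep]
          omega
        · -- y (the largest fitting partner) is marked
          rw [hm3]
          have hymem : y ∈ ws2 := by rw [hsplit]; simp
          have hy_le : y ≤ limit := by
            rcases hINV2.1 y hymem with h | h
            · exact h
            · exact absurd hy (Hq y hymem h)
          have hFv2split : Fv limit ws2 = Fv limit u ++ y :: Fv limit v := by
            rw [hsplit]; unfold Fv; rw [List.filter_append]; simp [hy_le]
          have hFv3 : Fv limit (u ++ (limit + 1) :: v) = Fv limit u ++ Fv limit v := by
            unfold Fv; rw [List.filter_append]; simp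
          have hAle : ∀ x ∈ Fv limit u, x ≤ r := by
            intro x hx
            have hpw := hINV2.2.1
            rw [hFv2split, List.pairwise_append] at hpw
            exact le_trans (hpw.2.2 x hx y (by simp)) hy
          have hBfail : ∀ z ∈ Fv limit v, ¬ z ≤ r := by
            intro z hz
            exact hv z (List.mem_of_mem_filter hz)
          have hstep : step r (Fv limit ws2) = Fv limit u ++ Fv limit v := by
            rw [hFv2split]
            exact step_remove hAle hy hBfail
          have hINV3 : INV limit (u ++ (limit + 1) :: v) := by
            refine ⟨?_, ?_, ?_⟩
            · intro x hx
              rcases List.mem_append.mp hx with hx | hx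
              · exact hINV2.1 x (by rw [hsplit]; exact List.mem_append_left _ hx)
              · rcases List.mem_cons.mp hx with hx | hx
                · right; exact hx
                · exact hINV2.1 x (by rw [hsplit]; exact List.mem_append_right _ (List.mem_cons_of_mem _ hx))
            · rw [hFv3]
              have hsub : List.Sublist (Fv limit u ++ Fv limit v) (Fv limit u ++ y :: Fv limit v) :=
                (List.Sublist.refl _).append (List.sublist_cons_self _ _)
              exact (hFv2split ▸ hINV2.2.1).sublist hsub
            · intro α β heq hph z hz hzle
              have hzr : z ∈ v → 0 < z := by
                intro hzv
                have := hv z hzv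
                omega
              rcases List.append_eq_append_iff.mp heq.symm with ⟨as, hu, hβ⟩ | ⟨bs, hα, hbs⟩
              · -- α is a prefix of u
                have hws2split : ws2 = α ++ (as ++ y :: v) := by
                  rw [hsplit, hu]; simp
                refine hINV2.2.2 α (as ++ y :: v) hws2split hph z ?_ hzle
                rw [hβ] at hz
                rcases List.mem_append.mp hz with hz | hz
                · exact List.mem_append_left _ hz
                · rcases List.mem_cons.mp hz with hz | hz
                  · exfalso; omega
                  · exact List.mem_append_right _ (List.mem_cons_of_mem _ hz)
              · -- β is contained in (limit+1) :: v
                cases bs with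
                | nil =>
                    simp at hbs
                    rw [← hbs] at hz
                    rcases List.mem_cons.mp hz with hz | hz
                    · exfalso; omega
                    · exact hzr hz
                | cons c bs' =>
                    have : v = bs' ++ β := by
                      have := hbs
                      simp at this
                      exact this.2
                    exact hzr (by rw [this]; exact List.mem_append_right _ hz)
          have hlen3 : (markLoop limit r ws2 ws2.length).length ≤ n := by
            rw [markLoop_length]
            omega
          rw [hm3] at hlen3
          rw [ih (u ++ (limit + 1) :: v) (soln + 1) hlen3 hINV3, hgreedy, hstep, hFv3]
          omega

theorem twoP_nil (limit : Int) : twoP limit [] = 0 := by rw [twoP]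

theorem twoP_cons (limit x : Int) (rest : List Int) (h : rest ≠ []) :
    twoP limit (x :: rest) =
      if x + rest.getLast h ≤ limit then 1 + twoP limit rest.dropLast
      else 1 + twoP limit (x :: rest.dropLast) := by
  rw [twoP]
  rw [dif_neg h]

theorem twoP_snoc (limit x M : Int) (mid : List Int) :
    twoP limit (x :: (mid ++ [M])) =
      if x + M ≤ limit then 1 + twoP limit mid else 1 + twoP limit (x :: mid) := by
  rw [twoP_cons limit x (mid ++ [M]) (by simp)]
  rw [List.getLast_concat, List.dropLast_concat]

theorem pairwise_le_getLast {l : List Int} (hpw : l.Pairwise (· ≤ ·)) (hne : l ≠ []) :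
    ∀ x ∈ l, x ≤ l.getLast hne := by
  intro x hx
  have hsnoc : l.dropLast ++ [l.getLast hne] = l := List.dropLast_append_getLast hne
  rw [← hsnoc] at hpw hx
  rw [List.pairwise_append] at hpw
  rcases List.mem_append.mp hx with hx | hx
  · exact hpw.2.2 x hx _ (by simp)
  · simp at hx; omega

-- all-pairs-fit lists: two-pointer pairs greedily every step
theorem twoP_all_fit (limit : Int) :
    ∀ l : List Int, (∀ x ∈ l, ∀ x' ∈ l, x + x' ≤ limit) →
      twoP limit l = (((l.length + 1) / 2 : Nat) : Int) := by
  intro l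
  induction hn : l.length using Nat.strong_induction_on generalizing l with
  | _ n ih =>
    subst hn
    intro hall
    cases l with
    | nil => rw [twoP_nil]; simp
    | cons x rest =>
      by_cases hrest : rest = []
      · subst hrest
        rw [twoP]
        simp
      · rw [twoP_cons limit x rest hrest]
        have hfit : x + rest.getLast hrest ≤ limit :=
          hall x (by simp) _ (List.mem_cons_of_mem _ (List.getLast_mem hrest))
        rw [if_pos hfit]
        have hsub : List.Sublist rest.dropLast (x :: rest) :=
          (List.dropLast_sublist rest).trans (List.sublist_cons_self _ _)
        have hrec := ih rest.dropLast.length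
          (by have := List.length_pos_of_ne_nil hrest
              simp only [List.length_dropLast, List.length_cons]; omega)
          rest.dropLast rfl
          (fun a ha b hb => hall a (hsub.subset ha) b (hsub.subset hb))
        rw [hrec]
        have hL : rest.length = rest.dropLast.length + 1 := by
          have := List.length_pos_of_ne_nil hrest
          simp only [List.length_dropLast]; omega
        have harith : ((x :: rest).length + 1) / 2 = 1 + (rest.dropLast.length + 1) / 2 := by
          rw [List.length_cons, hL]; omega
        rw [harith]
        push_cast
        ring

-- exchange: removing the minimum or removing a universally-fitting element y gives the same count
theorem twoP_exchange (limit : Int) :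
    ∀ n a (y : Int) b, (a ++ y :: b).length ≤ n →
      (a ++ y :: b).Pairwise (· ≤ ·) →
      (∀ x ∈ a ++ y :: b, x + y ≤ limit) →
      twoP limit ((a ++ y :: b).tail) = twoP limit (a ++ b) := by
  intro n
  induction n with
  | zero =>
      intro a y b hlen _ _
      exfalso
      simp [List.length_append] at hlen
  | succ n ih =>
      intro a y b hlen hsort hfit
      cases a with
      | nil => simp
      | cons s a' =>
        simp only [List.cons_append, List.tail_cons] at hsort hfit ⊢
        have hsy : s ≤ y := (List.pairwise_cons.mp hsort).1 y (by simp)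
        by_cases hb : b = []
        · subst hb
          simp only [List.append_nil]
          have hally : ∀ x ∈ s :: (a' ++ [y]), x ≤ y := by
            intro x hx
            rcases List.mem_cons.mp hx with hx | hx
            · omega
            · have := (List.pairwise_cons.mp hsort).2
              rw [List.pairwise_append] at this
              rcases List.mem_append.mp hx with hx | hx
              · exact this.2.2 x hx y (by simp)
              · simp at hx; omega
          have hall : ∀ x ∈ s :: (a' ++ [y]), ∀ x' ∈ s :: (a' ++ [y]), x + x' ≤ limit := by
            intro x hx x' hx'
            calc x + x' ≤ x + y := by have := hally x' hx'; omega
              _ ≤ limit := hfit x hx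
          have hmemL : ∀ x ∈ a' ++ [y], x ∈ s :: (a' ++ [y]) :=
            fun x hx => List.mem_cons_of_mem _ hx
          have hmemR : ∀ x ∈ s :: a', x ∈ s :: (a' ++ [y]) := by
            intro x hx
            rcases List.mem_cons.mp hx with hx | hx
            · simp [hx]
            · simp [hx]
          rw [twoP_all_fit limit (a' ++ [y])
              (fun x hx x' hx' => hall x (hmemL x hx) x' (hmemL x' hx')),
            twoP_all_fit limit (s :: a')
              (fun x hx x' hx' => hall x (hmemR x hx) x' (hmemR x' hx'))]
          simp
        · obtain ⟨M, b₀, hbsnoc⟩ : ∃ M b₀, b₀ ++ [M] = b :=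
            ⟨b.getLast hb, b.dropLast, List.dropLast_append_getLast hb⟩
          have hMmem : M ∈ s :: a' ++ y :: b := by rw [← hbsnoc]; simp
          have hMfit : M + y ≤ limit := hfit M hMmem
          cases a' with
          | nil =>
              rw [← hbsnoc]
              simp only [List.nil_append]
              rw [twoP_snoc limit y M b₀, if_pos (by omega)]
              rw [twoP_snoc limit s M b₀, if_pos (by omega)]
          | cons s₂ a'' =>
              simp only [List.cons_append]
              have hs₂y : s₂ ≤ y :=
                (List.pairwise_cons.mp (List.pairwise_cons.mp hsort).2).1 y (by simp)
              -- rewrite both sides into snoc form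
              have hshapeL : s₂ :: (a'' ++ y :: b) = s₂ :: ((a'' ++ y :: b₀) ++ [M]) := by
                rw [← hbsnoc]; simp
              have hshapeR : s :: s₂ :: (a'' ++ b) = s :: ((s₂ :: (a'' ++ b₀)) ++ [M]) := by
                rw [← hbsnoc]; simp
              rw [hshapeL, twoP_snoc limit s₂ M (a'' ++ y :: b₀),
                if_pos (by omega)]
              rw [hshapeR, twoP_snoc limit s M (s₂ :: (a'' ++ b₀)), if_pos (by omega)]
              -- inner lists match by the induction hypothesis (exchange on the shorter list)
              have hsubX : List.Sublist (s₂ :: (a'' ++ y :: b₀)) (s :: s₂ :: (a'' ++ y :: b)) := by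
                have h1 : List.Sublist (s₂ :: (a'' ++ y :: b₀)) ((s₂ :: (a'' ++ y :: b₀)) ++ [M]) :=
                  List.sublist_append_left _ _
                have h2 : (s₂ :: (a'' ++ y :: b₀)) ++ [M] = s₂ :: (a'' ++ y :: b) := by
                  rw [← hbsnoc]; simp
                rw [h2] at h1
                exact h1.cons s
              have hrec := ih (s₂ :: a'') y b₀
                (by rw [← hbsnoc] at hlen; simp [List.length_append] at hlen ⊢; omega)
                (hsort.sublist hsubX)
                (fun x hx => hfit x (hsubX.subset hx))
              simpa using hrec

theorem greedy_eq_twoP (limit : Int) :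
    ∀ n l, l.length ≤ n → l.Pairwise (· ≤ ·) → greedy limit l = twoP limit l := by
  intro n
  induction n with
  | zero =>
      intro l hlen _
      have : l = [] := by cases l with | nil => rfl | cons a t => simp at hlen
      subst this
      rw [greedy, twoP_nil]
      simp
  | succ n ih =>
      intro l hlen hsort
      by_cases hl : l = []
      · subst hl; rw [greedy, twoP_nil]; simp
      · have hsnoc : l.dropLast ++ [l.getLast hl] = l := List.dropLast_append_getLast hl
        have hg : greedy limit l =
            1 + greedy limit (step (limit - l.getLast hl) l.dropLast) := by
          rw [greedy, dif_neg hl]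
        have hsort₀ : l.dropLast.Pairwise (· ≤ ·) := hsort.sublist (List.dropLast_sublist l)
        have hle_m : ∀ x ∈ l.dropLast, x ≤ l.getLast hl :=
          fun x hx => pairwise_le_getLast hsort hl x ((List.dropLast_prefix l).subset hx)
        have hlenpos : 0 < l.length := List.length_pos_of_ne_nil hl
        have hlen₀ : l.dropLast.length = l.length - 1 := by simp
        by_cases hp : l.dropLast.takeWhile (fun x => decide (x ≤ limit - l.getLast hl)) = []
        · have hstep : step (limit - l.getLast hl) l.dropLast = l.dropLast := by
            unfold step; rw [hp]; simp
          rw [hg, hstep, ih l.dropLast (by omega) hsort₀]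
          cases hl₀ : l.dropLast with
          | nil =>
              have hm1 : l = [l.getLast hl] := by
                conv_lhs => rw [← hsnoc, hl₀]
                simp
              have tw1 : twoP limit [l.getLast hl] = 1 := by rw [twoP]; simp
              rw [twoP_nil]
              conv_rhs => rw [hm1]
              rw [tw1]
              simp
          | cons s l₀' =>
              have hlshape : l = s :: (l₀' ++ [l.getLast hl]) := by
                conv_lhs => rw [← hsnoc, hl₀]
                simp
              have hs_not : ¬ s ≤ limit - l.getLast hl := by
                intro hsr
                rw [hl₀, List.takeWhile_cons, if_pos (by simpa using hsr)] at hp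
                simp at hp
              conv_rhs => rw [hlshape]
              rw [twoP_snoc, if_neg (by omega)]
        · -- some element fits: the largest fitting one is removed
          obtain ⟨btl, hbtl⟩ :=
            List.takeWhile_prefix (l := l.dropLast) (fun x => decide (x ≤ limit - l.getLast hl))
          have hpsnoc :
              (l.dropLast.takeWhile (fun x => decide (x ≤ limit - l.getLast hl))).dropLast ++
                [(l.dropLast.takeWhile (fun x => decide (x ≤ limit - l.getLast hl))).getLast hp] =
              l.dropLast.takeWhile (fun x => decide (x ≤ limit - l.getLast hl)) :=
            List.dropLast_append_getLast hp
          set p := l.dropLast.takeWhile (fun x => decide (x ≤ limit - l.getLast hl)) with hpdef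
          set yv := p.getLast hp with hyvdef
          set a := p.dropLast with hadef
          have hstep : step (limit - l.getLast hl) l.dropLast = a ++ btl := by
            unfold step
            rw [← hpdef, if_neg hp]
            congr 1
            rw [← hbtl]
            exact List.drop_left
          have hpsnoc' : a ++ [yv] = p := by rw [hpdef]; exact hpsnoc
          have hl₀split : l.dropLast = a ++ yv :: btl := by
            rw [← hbtl, ← hpsnoc']; simp
          have hyv_r : yv ≤ limit - l.getLast hl := by
            have := List.mem_takeWhile_imp (l := l.dropLast)
              (p := fun x => decide (x ≤ limit - l.getLast hl))
              (x := yv) (by rw [← hpdef]; exact List.getLast_mem hp)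
            simpa using this
          have hfitE : ∀ x ∈ a ++ yv :: btl, x + yv ≤ limit := by
            intro x hx
            have hxm : x ≤ l.getLast hl := hle_m x (by rw [hl₀split]; exact hx)
            omega
          have hsortE : (a ++ yv :: btl).Pairwise (· ≤ ·) := hl₀split ▸ hsort₀
          have hE := twoP_exchange limit (a ++ yv :: btl).length a yv btl (le_refl _)
            hsortE hfitE
          cases hl₀c : l.dropLast with
          | nil => exfalso; rw [hl₀c] at hpdef; simp at hpdef; exact hp hpdef
          | cons s l₀' =>
              have hs_r : s ≤ limit - l.getLast hl := by
                by_contra hsr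
                rw [hl₀c, List.takeWhile_cons, if_neg (by simpa using hsr)] at hpdef
                exact hp hpdef
              have hlshape : l = s :: (l₀' ++ [l.getLast hl]) := by
                conv_lhs => rw [← hsnoc, hl₀c]
                simp
              have htail : l₀' = (a ++ yv :: btl).tail := by
                rw [← hl₀split, hl₀c, List.tail_cons]
              have hlenE : (a ++ btl).length ≤ n := by
                have : l.dropLast.length = (a ++ yv :: btl).length := by rw [hl₀split]
                simp [List.length_append] at this ⊢
                omega
              have hsortAB : (a ++ btl).Pairwise (· ≤ ·) :=
                hsortE.sublist ((List.Sublist.refl a).append (List.sublist_cons_self _ _))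
              rw [hg, hstep, ih (a ++ btl) hlenE hsortAB]
              conv_rhs => rw [hlshape]
              rw [twoP_snoc, if_pos (by omega), htail, hE]

theorem tpLoop_eq (limit : Int) (fleet : List Int) :
    ∀ n (lo hi rockets : Int), (hi + 1 - lo).toNat ≤ n → 0 ≤ lo → hi < (fleet.length : Int) →
      tpLoop limit fleet lo hi rockets =
        rockets + twoP limit ((fleet.drop lo.toNat).take (hi + 1 - lo).toNat) := by
  intro n
  induction n with
  | zero =>
      intro lo hi rockets hfuel hlo hhi
      rw [tpLoop, if_neg (by omega)]
      have h0 : (hi + 1 - lo).toNat = 0 := by omega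
      rw [h0, List.take_zero, twoP_nil]
      omega
  | succ n ih =>
      intro lo hi rockets hfuel hlo hhi
      by_cases hlh : lo ≤ hi
      · rw [tpLoop, if_pos hlh]
        have hloN : lo.toNat < fleet.length := by omega
        have hhiN : hi.toNat < fleet.length := by omega
        have hgetlo : PySem.List.pyGetD fleet lo 0 = fleet[lo.toNat] :=
          PySem.List.pyGetD_eq_getElem fleet 0 hlo (by omega)
        have hgethi : PySem.List.pyGetD fleet hi 0 = fleet[hi.toNat] :=
          PySem.List.pyGetD_eq_getElem fleet 0 (by omega) hhi
        have hdropc : fleet.drop lo.toNat = fleet[lo.toNat] :: fleet.drop (lo.toNat + 1) :=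
          List.drop_eq_getElem_cons hloN
        rw [hgetlo, hgethi]
        cases hk : (hi - lo).toNat with
        | zero =>
            -- lo = hi : a single leftover element, one rocket either way
            have hk1 : (hi + 1 - lo).toNat = 1 := by omega
            have tw1 : twoP limit [fleet[lo.toNat]] = 1 := by rw [twoP]; simp
            have hsub : (fleet.drop lo.toNat).take (hi + 1 - lo).toNat = [fleet[lo.toNat]] := by
              rw [hk1, hdropc, List.take_succ_cons, List.take_zero]
            rw [hsub, tw1]
            by_cases hc : fleet[lo.toNat] + fleet[hi.toNat] ≤ limit
            · rw [if_pos hc, ih (lo + 1) (hi - 1) (rockets + 1) (by omega) (by omega) (by omega)]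
              have h0 : (hi - 1 + 1 - (lo + 1)).toNat = 0 := by omega
              rw [h0, List.take_zero, twoP_nil]
              omega
            · rw [if_neg hc, ih lo (hi - 1) (rockets + 1) (by omega) (by omega) (by omega)]
              have h0 : (hi - 1 + 1 - lo).toNat = 0 := by omega
              rw [h0, List.take_zero, twoP_nil]
              omega
        | succ k' =>
            -- at least two elements between the pointers
            have hk1 : (hi + 1 - lo).toNat = k' + 2 := by omega
            have hsub : (fleet.drop lo.toNat).take (hi + 1 - lo).toNat =
                fleet[lo.toNat] :: ((fleet.drop (lo.toNat + 1)).take (k' + 1)) := by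
              rw [hk1, hdropc, List.take_succ_cons]
            have hrestlen : ((fleet.drop (lo.toNat + 1)).take (k' + 1)).length = k' + 1 := by
              simp [List.length_take, List.length_drop]
              omega
            have hrestne : (fleet.drop (lo.toNat + 1)).take (k' + 1) ≠ [] := by
              intro h; rw [h] at hrestlen; simp at hrestlen
            have hlast : ((fleet.drop (lo.toNat + 1)).take (k' + 1)).getLast hrestne =
                fleet[hi.toNat] := by
              rw [List.getLast_eq_getElem]
              have hidx : lo.toNat + 1 + k' = hi.toNat := by omega
              simp only [hrestlen, Nat.add_sub_cancel, List.getElem_take, List.getElem_drop]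
              simp only [hidx]
            have hdl : ((fleet.drop (lo.toNat + 1)).take (k' + 1)).dropLast =
                (fleet.drop (lo.toNat + 1)).take k' := by
              rw [List.dropLast_eq_take, hrestlen, Nat.add_sub_cancel, List.take_take,
                Nat.min_eq_left (by omega)]
            rw [hsub, twoP_cons limit _ _ hrestne, hlast, hdl]
            by_cases hc : fleet[lo.toNat] + fleet[hi.toNat] ≤ limit
            · rw [if_pos hc, if_pos hc,
                ih (lo + 1) (hi - 1) (rockets + 1) (by omega) (by omega) (by omega)]
              have h1 : (lo + 1).toNat = lo.toNat + 1 := by omega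
              have h2 : (hi - 1 + 1 - (lo + 1)).toNat = k' := by omega
              rw [h1, h2]
              omega
            · rw [if_neg hc, if_neg hc,
                ih lo (hi - 1) (rockets + 1) (by omega) (by omega) (by omega)]
              have h2 : (hi - 1 + 1 - lo).toNat = k' + 1 := by omega
              have hsub2 : (fleet.drop lo.toNat).take (k' + 1) =
                  fleet[lo.toNat] :: ((fleet.drop (lo.toNat + 1)).take k') := by
                rw [hdropc, List.take_succ_cons]
              rw [h2, hsub2]
              omega
      · rw [tpLoop, if_neg hlh]
        have h0 : (hi + 1 - lo).toNat = 0 := by omega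
        rw [h0, List.take_zero, twoP_nil]
        omega

-- ===== VERDICT (by name: the statement is the Claim_ definition above) =====
theorem solve_spec : Claim_equal_solve := by
  unfold Claim_equal_solve
  intro weights limit _
  unfold Spec_solve
  simp only [solve, solve_alt]
  have hSpw : (PySem.List.sorted weights (fun x => x) false).Pairwise (· ≤ ·) := by
    simpa using PySem.List.sorted_pairwise weights (fun x => x)
  set S := PySem.List.sorted weights (fun x => x) false with hS
  rw [solveLoop_dropTail]
  have hws0pw : (dropTail limit S).Pairwise (· ≤ ·) :=
    hSpw.sublist (dropTail_prefix limit S).sublist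
  have hmem : ∀ x ∈ dropTail limit S, x ≤ limit := by
    intro x hx
    have hne : dropTail limit S ≠ [] := by
      intro h; rw [h] at hx; simp at hx
    have hlast : (dropTail limit S).getLast hne ≤ limit :=
      dropTail_last_le limit S _ (List.getLast?_eq_some_getLast hne)
    exact le_trans (pairwise_le_getLast hws0pw hne x hx) hlast
  have hINV0 : INV limit (dropTail limit S) := by
    refine ⟨fun x hx => Or.inl (hmem x hx), ?_, ?_⟩
    · exact hws0pw.sublist List.filter_sublist
    · intro u v heq hm z hz hzle
      exfalso
      have : (limit + 1) ∈ dropTail limit S := by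
        rw [heq]; exact List.mem_append_left _ hm
      have := hmem _ this
      omega
  rw [solveLoop_eq limit (dropTail limit S).length (dropTail limit S) 0 (le_refl _) hINV0]
  rw [dropTail_filter]
  have hperm : (Fv limit S).Perm (weights.filter (fun w => decide (w ≤ limit))) :=
    (PySem.List.sorted_perm weights (fun x => x) false).filter _
  have hFSpw : (Fv limit S).Pairwise (· ≤ ·) := hSpw.sublist List.filter_sublist
  have hSF_eq : PySem.List.sorted (weights.filter (fun w => decide (w ≤ limit))) (fun x => x) false
      = Fv limit S :=
    PySem.List.sorted_id_eq_of_perm_of_pairwise _ _ hperm hFSpw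
  have hRHS := tpLoop_eq limit
    (PySem.List.sorted (weights.filter (fun w => decide (w ≤ limit))) (fun x => x) false)
    (PySem.List.sorted (weights.filter (fun w => decide (w ≤ limit))) (fun x => x) false).length
    0 (((PySem.List.sorted (weights.filter (fun w => decide (w ≤ limit))) (fun x => x) false).length : Int) - 1)
    0 (by omega) (by omega) (by omega)
  have h3 : (((PySem.List.sorted (weights.filter (fun w => decide (w ≤ limit))) (fun x => x) false).length : Int) - 1 + 1 - 0).toNat
      = (PySem.List.sorted (weights.filter (fun w => decide (w ≤ limit))) (fun x => x) false).length := by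
    omega
  rw [h3] at hRHS
  have h4 : ((0 : Int).toNat) = 0 := rfl
  rw [h4, List.drop_zero, List.take_length] at hRHS
  rw [hRHS, hSF_eq]
  rw [greedy_eq_twoP limit (Fv limit S).length (Fv limit S) (le_refl _) hFSpw]
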